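-- pv_equiv track=rewrite | github.com/genialis/resolwe | resolwe/flow/models/fields.py | convert_version_int_to_string
-- ===== SOURCE A (Python) =====
-- def convert_version_int_to_string(number: int, number_bits: list[int]) -> str:
--     """Convert int version to string version.
--
--     >>> convert_version_int_to_string(50331649,[8,8,16])
--     '3.0.1'
--     """
--     number_strings = []
--     total_bits = sum(number_bits)
--     for bits in number_bits:
--         shift_amount = total_bits - bits
--         number_segment = number >> shift_amount
--         number_strings.append(str(number_segment))
--         total_bits = total_bits - bits
--         number = number - (number_segment << shift_amount)
--     return ".".join(number_strings)
-- ===== SOURCE B (Python) =====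
-- def convert_version_int_to_string(number: int, number_bits: list[int]) -> str:
--     """Convert int version to string version (bottom-up: peel segments from the low end)."""
--     if not number_bits:
--         return ""
--     segments = []
--     for bits in reversed(number_bits[1:]):
--         segments.append(number % (1 << bits))
--         number >>= bits
--     segments.append(number)  # most-significant field keeps any overflow bits, unmasked
--     segments.reverse()
--     return ".".join(str(s) for s in segments)
-- ===== Notes on version B (the rewrite author's own statement) =====
-- stated objective: alternative
-- what changed: B peels segments bottom-up from the low end (mask with % (1<<bits) then shift right, top field unmasked, list reversed at the end) instead of A's top-down scheme that maintains a running total_bits and subtracts each shifted segment from the number.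
-- outside the precondition, e.g. on convert_version_int_to_string(5, [3, -1, 2]): A returns '2.0.1', B raises ValueError
import Mathlib
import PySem

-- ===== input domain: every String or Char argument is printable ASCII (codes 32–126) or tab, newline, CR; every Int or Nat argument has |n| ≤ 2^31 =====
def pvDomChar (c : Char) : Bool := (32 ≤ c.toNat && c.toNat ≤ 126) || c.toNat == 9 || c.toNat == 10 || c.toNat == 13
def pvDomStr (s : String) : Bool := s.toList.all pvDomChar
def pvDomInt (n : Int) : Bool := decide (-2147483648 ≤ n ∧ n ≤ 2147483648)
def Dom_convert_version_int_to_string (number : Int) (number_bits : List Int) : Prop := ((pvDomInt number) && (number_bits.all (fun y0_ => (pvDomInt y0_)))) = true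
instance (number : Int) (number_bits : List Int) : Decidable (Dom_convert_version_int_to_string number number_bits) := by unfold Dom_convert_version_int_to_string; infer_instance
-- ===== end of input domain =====

-- B converts bottom-up (mask low field, shift right, top field unmasked, reverse at the end)
-- instead of A's top-down running-total_bits subtraction scheme; objective: alternative decomposition.


-- ===== PORT A =====
-- one loop iteration of A; `number >> k` and `seg << k` for k ≥ 0 are exact as
-- floordiv/multiplication by 2^k (Pre_ keeps every shift amount nonnegative)
def stepA (st : List String × Int × Int) (bits : Int) : List String × Int × Int :=
  let shift := st.2.1 - bits
  let seg := PySem.Int.floordiv st.2.2 ((2:Int) ^ shift.toNat)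
  (st.1 ++ [PySem.Int.toStr seg], st.2.1 - bits, st.2.2 - seg * (2:Int) ^ shift.toNat)

def convert_version_int_to_string (number : Int) (number_bits : List Int) : String :=
  String.intercalate "." (number_bits.foldl stepA ([], number_bits.sum, number)).1

-- ===== PORT B =====
-- one loop iteration of B; `x % (1 << bits)` and `x >>= bits` for bits ≥ 0 are
-- exact as mod/floordiv by 2^bits (Pre_ keeps every bits nonnegative)
def stepB (st : List Int × Int) (bits : Int) : List Int × Int :=
  (st.1 ++ [PySem.Int.mod st.2 ((2:Int) ^ bits.toNat)],
   PySem.Int.floordiv st.2 ((2:Int) ^ bits.toNat))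

def convert_version_int_to_string_alt (number : Int) (number_bits : List Int) : String :=
  match number_bits with
  | [] => ""
  | _ :: rest =>
      let st := rest.reverse.foldl stepB ([], number)
      String.intercalate "." (((st.1 ++ [st.2]).reverse).map PySem.Int.toStr)

-- ===== PRECONDITION & SPEC =====
-- Pre_ excludes lists with a negative bit width after the first position (the first
-- width itself is never shifted by): Python A raises ValueError (negative shift count)
-- on almost all of them, and on the rare remainder where negative widths cancel inside
-- the suffix sums so that A still returns, B's own shift raises (see the cite).
def Pre_convert_version_int_to_string (number : Int) (number_bits : List Int) : Prop :=
  ∀ b ∈ number_bits.tail, 0 ≤ b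
instance (number : Int) (number_bits : List Int) : Decidable (Pre_convert_version_int_to_string number number_bits) := by unfold Pre_convert_version_int_to_string; infer_instance

def pvWitness_convert_version_int_to_string : Int × List Int := (50331649, [8, 8, 16])

def Spec_convert_version_int_to_string (number : Int) (number_bits : List Int) (out : String) : Prop := out = convert_version_int_to_string_alt number number_bits
instance (number : Int) (number_bits : List Int) (out : String) : Decidable (Spec_convert_version_int_to_string number number_bits out) := by unfold Spec_convert_version_int_to_string; infer_instance

-- ===== CLAIM (what is proved, stated in full; the proofs are below) =====
def Claim_equal_convert_version_int_to_string : Prop := ∀ (number : Int) (number_bits : List Int), Dom_convert_version_int_to_string number number_bits → Pre_convert_version_int_to_string number number_bits → Spec_convert_version_int_to_string number number_bits (convert_version_int_to_string number number_bits)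

-- ===== LEMMAS AND PROOFS =====

-- common specification: the list of field values, most-significant first
def pvS (l : List Int) : Nat := (l.map Int.toNat).sum

def pvSegs : Int → List Int → List Int
  | _, [] => []
  | n, _ :: t => n / 2 ^ pvS t :: pvSegs (n % 2 ^ pvS t) t

theorem sum_eq_pvS (l : List Int) (h : ∀ b ∈ l, 0 ≤ b) : l.sum = (pvS l : Int) := by
  induction l with
  | nil => simp [pvS]
  | cons b t ih =>
      have hb := h b (by simp)
      have ht := ih (fun x hx => h x (by simp [hx]))
      simp [pvS, List.sum_cons] at *
      omega

theorem mod_mul_div_pow (n : Int) (s a : Nat) :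
    (n % ((2:Int) ^ s * 2 ^ a)) / 2 ^ s = (n / 2 ^ s) % 2 ^ a := by
  have hM : (0:Int) < 2 ^ s := by positivity
  have hq : n / ((2:Int) ^ s * 2 ^ a) = n / 2 ^ s / 2 ^ a :=
    (Int.ediv_ediv_of_nonneg (le_of_lt hM)).symm
  have h1 : n % ((2:Int) ^ s * 2 ^ a)
      = n + 2 ^ s * (-((2:Int) ^ a * (n / 2 ^ s / 2 ^ a))) := by
    rw [Int.emod_def, hq]; ring
  rw [h1, Int.add_mul_ediv_left _ _ (ne_of_gt hM), Int.emod_def]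
  ring

theorem foldA_eq (l : List Int) (h : ∀ b ∈ l.tail, 0 ≤ b) :
    ∀ (strs : List String) (n : Int),
      (l.foldl stepA (strs, l.sum, n)).1 = strs ++ (pvSegs n l).map PySem.Int.toStr := by
  induction l with
  | nil => intro strs n; simp [pvSegs]
  | cons b t ih =>
      intro strs n
      have ht : ∀ x ∈ t, 0 ≤ x := h
      have htt : ∀ x ∈ t.tail, 0 ≤ x := fun x hx => ht x (List.mem_of_mem_tail hx)
      have hshift : (b :: t).sum - b = t.sum := by simp [List.sum_cons]
      have hts : (t.sum).toNat = pvS t := by rw [sum_eq_pvS t ht]; exact Int.toNat_natCast _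
      have hpos : (0:Int) < 2 ^ pvS t := by positivity
      have hseg : PySem.Int.floordiv n ((2:Int) ^ pvS t) = n / 2 ^ pvS t :=
        PySem.Int.floordiv_eq_ediv_of_pos hpos
      have hrem : n - n / 2 ^ pvS t * (2:Int) ^ pvS t = n % 2 ^ pvS t := by
        rw [Int.emod_def]; ring
      have hstep : stepA (strs, (b :: t).sum, n) b
          = (strs ++ [PySem.Int.toStr (n / 2 ^ pvS t)], t.sum, n % 2 ^ pvS t) := by
        simp only [stepA, hshift, hts, hseg, hrem]
      calc ((b :: t).foldl stepA (strs, (b :: t).sum, n)).1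
          = (t.foldl stepA (strs ++ [PySem.Int.toStr (n / 2 ^ pvS t)], t.sum, n % 2 ^ pvS t)).1 := by
            rw [List.foldl_cons, hstep]
        _ = strs ++ (pvSegs n (b :: t)).map PySem.Int.toStr := by
            rw [ih htt]; simp [pvSegs]

theorem foldB_eq (r : List Int) (h : ∀ b ∈ r, 0 ≤ b) (n : Int) :
    (r.reverse.foldl stepB ([], n)).2 = n / 2 ^ pvS r ∧
    (r.reverse.foldl stepB ([], n)).1.reverse = pvSegs (n % 2 ^ pvS r) r := by
  rw [List.foldl_reverse]
  induction r generalizing n with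
  | nil => simp [pvS, pvSegs]
  | cons b t ih =>
      have hb := h b (by simp)
      have ht : ∀ x ∈ t, 0 ≤ x := fun x hx => h x (by simp [hx])
      obtain ⟨ih2, ih1⟩ := ih ht n
      have hpos : (0:Int) < 2 ^ pvS t := by positivity
      have hposb : (0:Int) < 2 ^ b.toNat := by positivity
      have hS : pvS (b :: t) = b.toNat + pvS t := by simp [pvS]
      have hpow : (2:Int) ^ pvS (b :: t) = 2 ^ pvS t * 2 ^ b.toNat := by
        rw [hS, pow_add]; ring
      have hdiv : PySem.Int.floordiv ((t.foldr (fun x y => stepB y x) ([], n)).2) ((2:Int) ^ b.toNat)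
          = n / 2 ^ pvS (b :: t) := by
        rw [PySem.Int.floordiv_eq_ediv_of_pos hposb, ih2, hpow,
          Int.ediv_ediv_of_nonneg (le_of_lt hpos)]
      have hmod : PySem.Int.mod ((t.foldr (fun x y => stepB y x) ([], n)).2) ((2:Int) ^ b.toNat)
          = (n % 2 ^ pvS (b :: t)) / 2 ^ pvS t := by
        rw [PySem.Int.mod_eq_emod_of_pos hposb, ih2, hpow, mod_mul_div_pow]
      have hmod2 : (n % (2:Int) ^ pvS (b :: t)) % 2 ^ pvS t = n % 2 ^ pvS t := by
        rw [hpow]; exact Int.mod_mul_right_mod n _ _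
      constructor
      · rw [List.foldr_cons]; exact hdiv
      · rw [List.foldr_cons]
        show ((List.foldr (fun x y => stepB y x) ([], n) t).1
            ++ [PySem.Int.mod (List.foldr (fun x y => stepB y x) ([], n) t).2 ((2:Int) ^ b.toNat)]).reverse
            = pvSegs (n % 2 ^ pvS (b :: t)) (b :: t)
        rw [List.reverse_append, hmod, ih1]
        simp only [pvSegs, hmod2, List.reverse_cons, List.reverse_nil, List.nil_append,
          List.singleton_append]

-- ===== VERDICT (by name: the statement is the Claim_ definition above) =====
theorem convert_version_int_to_string_spec : Claim_equal_convert_version_int_to_string := by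
  intro number number_bits _ hpre
  unfold Spec_convert_version_int_to_string
  cases number_bits with
  | nil => rfl
  | cons b rest =>
      have ht : ∀ x ∈ rest, 0 ≤ x := hpre
      obtain ⟨h2, h1⟩ := foldB_eq rest ht number
      unfold convert_version_int_to_string convert_version_int_to_string_alt
      rw [foldA_eq (b :: rest) hpre [] number]
      simp only [List.nil_append, List.reverse_append, List.reverse_cons, List.reverse_nil,
        List.nil_append, List.singleton_append, List.map_cons]
      rw [h1, h2]
      simp [pvSegs]
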